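-- pv_equiv track=rewrite | github.com/yunjohn/keysight | src/keysight_scope_app/device/instrument.py | _normalize_trigger_source
-- ===== SOURCE A (Python) =====
-- SUPPORTED_CHANNELS = ("CHANnel1", "CHANnel2", "CHANnel3", "CHANnel4")
--
-- def _normalize_trigger_source(value: str) -> str:
--     normalized = value.strip().upper()
--     mapping = {
--         "CHAN1": "CHANnel1",
--         "CHANNEL1": "CHANnel1",
--         "CHAN2": "CHANnel2",
--         "CHANNEL2": "CHANnel2",
--         "CHAN3": "CHANnel3",
--         "CHANNEL3": "CHANnel3",
--         "CHAN4": "CHANnel4",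
--         "CHANNEL4": "CHANnel4",
--     }
--     if normalized in mapping:
--         return mapping[normalized]
--     for channel in SUPPORTED_CHANNELS:
--         if normalized == channel.upper():
--             return channel
--     raise ValueError(f"不支持的触发源: {value}")
-- ===== SOURCE B (Python) =====
-- def _normalize_trigger_source(value: str) -> str:
--     normalized = value.strip().upper()
--     for prefix in ("CHANNEL", "CHAN"):
--         if normalized.startswith(prefix):
--             suffix = normalized[len(prefix):]
--             if suffix in ("1", "2", "3", "4"):
--                 return f"CHANnel{suffix}"
--             break
--     raise ValueError(f"不支持的触发源: {value}")
-- ===== Notes on version B (the rewrite author's own statement) =====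
-- stated objective: simpler
-- what changed: Replaces the 8-entry lookup dict plus a fallback loop over SUPPORTED_CHANNELS with structural parsing: strip off the prefix 'CHANNEL' or 'CHAN' and accept exactly a single-digit suffix '1'-'4', building the result as f'CHANnel{suffix}'.
import Mathlib
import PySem

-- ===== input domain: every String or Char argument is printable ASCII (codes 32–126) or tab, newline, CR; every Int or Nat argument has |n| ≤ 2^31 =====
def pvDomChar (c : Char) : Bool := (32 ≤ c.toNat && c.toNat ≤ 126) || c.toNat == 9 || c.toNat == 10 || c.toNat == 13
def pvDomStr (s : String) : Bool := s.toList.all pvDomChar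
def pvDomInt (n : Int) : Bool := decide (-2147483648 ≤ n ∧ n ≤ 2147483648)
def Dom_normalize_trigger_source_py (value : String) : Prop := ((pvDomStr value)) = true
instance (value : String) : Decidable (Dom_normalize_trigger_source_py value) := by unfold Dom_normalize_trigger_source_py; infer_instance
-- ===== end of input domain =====

-- B parses the normalized string structurally (prefix 'CHANNEL'/'CHAN' + digit 1-4) instead of A's lookup table plus fallback loop; return values proved equal wherever A returns.

-- ===== PORT A =====
def pvSupportedChannels : List String := ["CHANnel1", "CHANnel2", "CHANnel3", "CHANnel4"]

def pvMappingA : PySem.Dict String String :=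
  PySem.Dict.ofList [("CHAN1", "CHANnel1"), ("CHANNEL1", "CHANnel1"),
                     ("CHAN2", "CHANnel2"), ("CHANNEL2", "CHANnel2"),
                     ("CHAN3", "CHANnel3"), ("CHANNEL3", "CHANnel3"),
                     ("CHAN4", "CHANnel4"), ("CHANNEL4", "CHANnel4")]

def normalize_trigger_source_py (value : String) : String :=
  let normalized := PySem.Str.upper (PySem.Str.strip value)
  match pvMappingA.get? normalized with
  | some v => v
  | none =>
    -- for channel in SUPPORTED_CHANNELS: if normalized == channel.upper(): return channel
    match pvSupportedChannels.find? (fun channel => normalized == PySem.Str.upper channel) with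
    | some channel => channel
    | none => ""   -- raise ValueError: excluded by Pre_

-- ===== PORT B =====
def pvCheckSuffix (suffix : String) : String :=
  if suffix ∈ (["1", "2", "3", "4"] : List String) then
    PySem.Str.join "" ["CHANnel", suffix]   -- f"CHANnel{suffix}"
  else ""   -- raise ValueError: excluded by Pre_

def normalize_trigger_source_py_alt (value : String) : String :=
  let normalized := PySem.Str.upper (PySem.Str.strip value)
  if PySem.Str.startswith normalized "CHANNEL" then
    pvCheckSuffix (PySem.Str.slice normalized (some 7) none)
  else if PySem.Str.startswith normalized "CHAN" then
    pvCheckSuffix (PySem.Str.slice normalized (some 4) none)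
  else ""   -- raise ValueError: excluded by Pre_

-- ===== PRECONDITION & SPEC =====
-- Pre_ excludes exactly the inputs on which A raises ValueError ("不支持的触发源"): those whose
-- stripped, uppercased form is not one of the eight accepted channel spellings.
def Pre_normalize_trigger_source_py (value : String) : Prop :=
  PySem.Str.upper (PySem.Str.strip value) ∈
    (["CHAN1", "CHANNEL1", "CHAN2", "CHANNEL2", "CHAN3", "CHANNEL3", "CHAN4", "CHANNEL4"] : List String)
instance (value : String) : Decidable (Pre_normalize_trigger_source_py value) := by unfold Pre_normalize_trigger_source_py; infer_instance

def pvWitness_normalize_trigger_source_py : String := " chan3 "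

def Spec_normalize_trigger_source_py (value : String) (out : String) : Prop := out = normalize_trigger_source_py_alt value
instance (value : String) (out : String) : Decidable (Spec_normalize_trigger_source_py value out) := by unfold Spec_normalize_trigger_source_py; infer_instance

-- ===== CLAIM (what is proved, stated in full; the proofs are below) =====
def Claim_equal_normalize_trigger_source_py : Prop := ∀ (value : String), Dom_normalize_trigger_source_py value → Pre_normalize_trigger_source_py value → Spec_normalize_trigger_source_py value (normalize_trigger_source_py value)

-- ===== LEMMAS AND PROOFS =====

-- ===== VERDICT (by name: the statement is the Claim_ definition above) =====
theorem normalize_trigger_source_py_spec : Claim_equal_normalize_trigger_source_py := by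
  intro value _ hpre
  unfold Pre_normalize_trigger_source_py at hpre
  unfold Spec_normalize_trigger_source_py normalize_trigger_source_py normalize_trigger_source_py_alt
  simp only [List.mem_cons, List.not_mem_nil, or_false] at hpre
  rcases hpre with h | h | h | h | h | h | h | h <;> rw [h] <;> decide
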